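-- pv_equiv track=rewrite | github.com/emmaev9/Advent-Of-Code-Problems | Probleme/Day5_part2.py | findNiceWord
-- ===== SOURCE A (Python) =====
-- def findNiceWord(word):
--     cond1 = False
--     cond2 = False
--
--     for i in range(len(word)-1):
--         dup = word[i:i+2]
--         if dup in word[i+2:]:
--             cond1 = True
--
--     for i in range(len(word)-2):
--         if word[i] == word[i+2]:
--             cond2 = True
--
--     if cond2 == True and cond1 == True:
--             return True
--     return False
-- ===== SOURCE B (Python) =====
-- def findNiceWord(word):
--     first = {}
--     has_pair = False
--     has_sandwich = False
--     n = len(word)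
--     for j in range(n - 1):
--         p = word[j:j+2]
--         if p in first:
--             if j - first[p] >= 2:
--                 has_pair = True
--         else:
--             first[p] = j
--         if j + 2 < n and word[j] == word[j+2]:
--             has_sandwich = True
--     return has_pair and has_sandwich
-- ===== Notes on version B (the rewrite author's own statement) =====
-- stated objective: faster
-- what changed: Replaces the quadratic substring search (each pair searched in the whole remaining suffix) by a single pass that records the first index of each pair in a dict and flags a later occurrence at distance >= 2, fusing the sandwich check into the same loop.
import Mathlib
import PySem

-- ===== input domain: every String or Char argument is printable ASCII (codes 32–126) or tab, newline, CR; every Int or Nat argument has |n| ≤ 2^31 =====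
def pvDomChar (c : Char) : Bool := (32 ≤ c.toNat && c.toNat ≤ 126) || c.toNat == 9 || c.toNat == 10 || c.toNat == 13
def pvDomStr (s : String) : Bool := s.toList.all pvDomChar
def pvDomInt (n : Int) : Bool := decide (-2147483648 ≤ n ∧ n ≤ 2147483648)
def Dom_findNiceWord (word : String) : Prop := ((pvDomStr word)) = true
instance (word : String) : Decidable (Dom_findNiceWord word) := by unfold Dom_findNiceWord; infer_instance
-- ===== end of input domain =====

-- B replaces A's quadratic per-index substring search by one pass with a dict of first pair-indices; same return value.

-- ===== PORT A =====
def findNiceWord (word : String) : Bool :=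
  let cs := word.toList
  let n : Int := (cs.length : Int)
  let cond1 := (PySem.List.pyRange 0 (n - 1) 1).foldl
    (fun c1 i =>
      if PySem.Chars.isIn (PySem.List.slice cs (some i) (some (i + 2))) (PySem.List.slice cs (some (i + 2)) none) then true else c1)
    false
  let cond2 := (PySem.List.pyRange 0 (n - 2) 1).foldl
    (fun c2 i =>
      if PySem.List.pyGet? cs i == PySem.List.pyGet? cs (i + 2) then true else c2)
    false
  if cond2 == true && cond1 == true then true else false

-- ===== PORT B =====
-- one step of B's single loop: dict update / pair flag, then the fused sandwich flag
def altStep (cs : List Char) (n : Int)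
    (st : PySem.Dict (List Char) Int × Bool × Bool) (j : Int) :
    PySem.Dict (List Char) Int × Bool × Bool :=
  match PySem.Dict.get? st.1 (PySem.List.slice cs (some j) (some (j + 2))) with
  | some f => (st.1, (if j - f ≥ 2 then true else st.2.1),
      if decide (j + 2 < n) && (PySem.List.pyGet? cs j == PySem.List.pyGet? cs (j + 2)) then true else st.2.2)
  | none => (st.1.insert (PySem.List.slice cs (some j) (some (j + 2))) j, st.2.1,
      if decide (j + 2 < n) && (PySem.List.pyGet? cs j == PySem.List.pyGet? cs (j + 2)) then true else st.2.2)

def findNiceWord_alt (word : String) : Bool :=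
  let cs := word.toList
  let n : Int := (cs.length : Int)
  let res := (PySem.List.pyRange 0 (n - 1) 1).foldl (altStep cs n) (PySem.Dict.empty, false, false)
  res.2.1 && res.2.2

-- ===== PRECONDITION & SPEC =====
def Spec_findNiceWord (word : String) (out : Bool) : Prop := out = findNiceWord_alt word
instance (word : String) (out : Bool) : Decidable (Spec_findNiceWord word out) := by unfold Spec_findNiceWord; infer_instance

-- ===== CLAIM (what is proved, stated in full; the proofs are below) =====
def Claim_equal_findNiceWord : Prop := ∀ (word : String), Dom_findNiceWord word → Spec_findNiceWord word (findNiceWord word)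

-- ===== LEMMAS AND PROOFS =====

-- the two-character window starting at i
def pr (cs : List Char) (i : Nat) : List Char := (cs.drop i).take 2

-- the two conditions both programs detect
def HPspec (cs : List Char) : Prop := ∃ i j : Nat, i + 2 ≤ j ∧ j + 2 ≤ cs.length ∧ pr cs j = pr cs i
def HSspec (cs : List Char) : Prop := ∃ i : Nat, i + 2 < cs.length ∧ cs[i]? = cs[i+2]?

lemma foldl_if_or {α : Type} (g : α → Bool) (l : List α) (b : Bool) :
    List.foldl (fun c i => if g i then true else c) b l = (b || l.any g) := by
  induction l generalizing b with
  | nil => simp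
  | cons a l ih => simp only [List.foldl, ih, List.any_cons]; cases g a <;> simp

lemma prefix_pr (cs : List Char) (i k : Nat) (hi : i + 2 ≤ cs.length) :
    (cs.drop i).take 2 <+: cs.drop k ↔ k + 2 ≤ cs.length ∧ (cs.drop k).take 2 = (cs.drop i).take 2 := by
  have hl : ((cs.drop i).take 2).length = 2 := by simp; omega
  constructor
  · intro h
    have h2 := h.length_le
    rw [List.length_drop, hl] at h2
    have hk : k + 2 ≤ cs.length := by omega
    refine ⟨hk, ?_⟩
    have h3 := List.prefix_iff_eq_take.mp h
    rw [hl] at h3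
    exact h3.symm
  · rintro ⟨hk, hpk⟩
    rw [← hpk]
    exact List.take_prefix _ _

lemma condA1_iff (cs : List Char) :
    ((PySem.List.pyRange 0 ((cs.length : Int) - 1) 1).foldl
      (fun c1 i =>
        if PySem.Chars.isIn (PySem.List.slice cs (some i) (some (i + 2))) (PySem.List.slice cs (some (i + 2)) none) then true else c1)
      false) = true ↔ HPspec cs := by
  rw [PySem.List.pyRange_one, List.foldl_map]
  simp only [zero_add, foldl_if_or, Bool.false_or, List.any_eq_true, List.mem_range]
  constructor
  · rintro ⟨k, hk, hin⟩
    have hk' : k + 2 ≤ cs.length := by omega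
    rw [show ((k : Int) + 2) = ((k + 2 : Nat) : Int) by push_cast; ring,
        PySem.List.slice_natCast, PySem.List.slice_from_natCast,
        Nat.add_sub_cancel_left] at hin
    obtain ⟨j, hpre⟩ := (PySem.Chars.exists_prefix_drop_iff_isIn _ _).2 hin
    rw [List.drop_drop] at hpre
    rw [prefix_pr cs k _ hk'] at hpre
    exact ⟨k, _, by omega, hpre.1, hpre.2⟩
  · rintro ⟨i, j, hij, hjl, hpp⟩
    refine ⟨i, by omega, ?_⟩
    rw [show ((i : Int) + 2) = ((i + 2 : Nat) : Int) by push_cast; ring,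
        PySem.List.slice_natCast, PySem.List.slice_from_natCast,
        Nat.add_sub_cancel_left]
    apply (PySem.Chars.exists_prefix_drop_iff_isIn _ _).1
    refine ⟨j - (i + 2), ?_⟩
    rw [List.drop_drop, show i + 2 + (j - (i + 2)) = j from by omega,
        prefix_pr cs i j (by omega)]
    exact ⟨hjl, hpp⟩

lemma condA2_iff (cs : List Char) :
    ((PySem.List.pyRange 0 ((cs.length : Int) - 2) 1).foldl
      (fun c2 i =>
        if PySem.List.pyGet? cs i == PySem.List.pyGet? cs (i + 2) then true else c2)
      false) = true ↔ HSspec cs := by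
  rw [PySem.List.pyRange_one, List.foldl_map]
  simp only [zero_add, foldl_if_or, Bool.false_or, List.any_eq_true, List.mem_range]
  constructor
  · rintro ⟨k, hk, hin⟩
    rw [show ((k : Int) + 2) = ((k + 2 : Nat) : Int) by push_cast; ring,
        PySem.List.pyGet?_natCast, PySem.List.pyGet?_natCast, beq_iff_eq] at hin
    exact ⟨k, by omega, hin⟩
  · rintro ⟨i, hil, hii⟩
    refine ⟨i, by omega, ?_⟩
    rw [show ((i : Int) + 2) = ((i + 2 : Nat) : Int) by push_cast; ring,
        PySem.List.pyGet?_natCast, PySem.List.pyGet?_natCast, beq_iff_eq]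
    exact hii

-- invariant of B's loop after processing indices 0..t-1
def InvB (cs : List Char) (t : Nat) (st : PySem.Dict (List Char) Int × Bool × Bool) : Prop :=
  (∀ p v, st.1.get? p = some v ↔ ∃ i : Nat, v = (i : Int) ∧ i < t ∧ pr cs i = p ∧ ∀ i' < i, pr cs i' ≠ p)
  ∧ (st.2.1 = true ↔ ∃ i k : Nat, i + 2 ≤ k ∧ k < t ∧ pr cs k = pr cs i)
  ∧ (st.2.2 = true ↔ ∃ i : Nat, i + 2 < cs.length ∧ i < t ∧ cs[i]? = cs[i+2]?)

lemma hs_step_iff (cs : List Char) (t : Nat) (b : Bool)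
    (hb : b = true ↔ ∃ i : Nat, i + 2 < cs.length ∧ i < t ∧ cs[i]? = cs[i+2]?) :
    ((if decide ((t : Int) + 2 < (cs.length : Int)) && (PySem.List.pyGet? cs (t : Int) == PySem.List.pyGet? cs ((t : Int) + 2)) then true else b) = true
      ↔ ∃ i : Nat, i + 2 < cs.length ∧ i < t + 1 ∧ cs[i]? = cs[i+2]?) := by
  rw [show ((t : Int) + 2) = ((t + 2 : Nat) : Int) by push_cast; ring,
      PySem.List.pyGet?_natCast, PySem.List.pyGet?_natCast]
  by_cases hc : t + 2 < cs.length ∧ cs[t]? = cs[t+2]?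
  · have hcond : (decide (((t + 2 : Nat) : Int) < (cs.length : Int)) && (cs[t]? == cs[t+2]?)) = true := by
      simp only [Bool.and_eq_true, decide_eq_true_eq, beq_iff_eq]
      exact ⟨by exact_mod_cast hc.1, hc.2⟩
    rw [hcond]
    simp only [if_true]
    constructor
    · intro _; exact ⟨t, hc.1, by omega, hc.2⟩
    · intro _; trivial
  · have hcond : (decide (((t + 2 : Nat) : Int) < (cs.length : Int)) && (cs[t]? == cs[t+2]?)) = false := by
      simp only [Bool.and_eq_false_iff, decide_eq_false_iff_not, beq_eq_false_iff_ne, ne_eq]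
      by_cases h1 : t + 2 < cs.length
      · right; intro h2; exact hc ⟨h1, h2⟩
      · left; push_cast; omega
    rw [hcond]
    simp only [Bool.false_eq_true, if_false, hb]
    constructor
    · rintro ⟨i, h1, h2, h3⟩; exact ⟨i, h1, by omega, h3⟩
    · rintro ⟨i, h1, h2, h3⟩
      refine ⟨i, h1, ?_, h3⟩
      rcases Nat.lt_succ_iff_lt_or_eq.mp h2 with h | h
      · exact h
      · subst h; exact absurd ⟨h1, h3⟩ hc

lemma invB_step (cs : List Char) (t : Nat) (st : PySem.Dict (List Char) Int × Bool × Bool)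
    (h : InvB cs t st) : InvB cs (t + 1) (altStep cs (cs.length : Int) st (t : Int)) := by
  obtain ⟨hd, hp, hs⟩ := h
  have hps : PySem.List.slice cs (some (t : Int)) (some ((t : Int) + 2)) = pr cs t := by
    rw [show ((t : Int) + 2) = ((t + 2 : Nat) : Int) by push_cast; ring,
        PySem.List.slice_natCast, Nat.add_sub_cancel_left]
    rfl
  rcases hget : PySem.Dict.get? st.1 (pr cs t) with _ | f
  · -- the pair is new: record its first index t
    have key : altStep cs (cs.length : Int) st (t : Int) =
        (st.1.insert (pr cs t) (t : Int), st.2.1,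
          if decide ((t : Int) + 2 < (cs.length : Int)) && (PySem.List.pyGet? cs (t : Int) == PySem.List.pyGet? cs ((t : Int) + 2)) then true else st.2.2) := by
      unfold altStep
      rw [hps, hget]
    rw [key]
    have hfresh : ∀ i < t, pr cs i ≠ pr cs t := by
      intro i hi hne
      have hex : ∃ m, pr cs m = pr cs t ∧ m < t := ⟨i, hne, hi⟩
      have hspec := Nat.find_spec hex
      have hsome := (hd (pr cs t) ((Nat.find hex : Nat) : Int)).2
        ⟨Nat.find hex, rfl, hspec.2, hspec.1, fun i' hi' =>
          fun hne' => Nat.find_min hex hi' ⟨hne', by omega⟩⟩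
      rw [hget] at hsome
      simp at hsome
    have hA : ∀ q v, (st.1.insert (pr cs t) (t : Int)).get? q = some v ↔
        ∃ i : Nat, v = (i : Int) ∧ i < t + 1 ∧ pr cs i = q ∧ ∀ i' < i, pr cs i' ≠ q := by
      intro q v
      rw [PySem.Dict.get?_insert]
      split_ifs with hq
      · subst hq
        constructor
        · intro hv
          refine ⟨t, (Option.some.injEq _ _).mp hv.symm, by omega, rfl, hfresh⟩
        · rintro ⟨i, hv, hit, hpri, _⟩
          rcases Nat.lt_succ_iff_lt_or_eq.mp hit with h' | h'
          · exact absurd hpri (hfresh i h')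
          · subst h'; rw [hv]
      · rw [hd q v]
        constructor
        · rintro ⟨i, hv, hit, hpri, hmin⟩; exact ⟨i, hv, by omega, hpri, hmin⟩
        · rintro ⟨i, hv, hit, hpri, hmin⟩
          refine ⟨i, hv, ?_, hpri, hmin⟩
          rcases Nat.lt_succ_iff_lt_or_eq.mp hit with h' | h'
          · exact h'
          · subst h'; exact absurd hpri.symm hq
    have hB : st.2.1 = true ↔ ∃ i k : Nat, i + 2 ≤ k ∧ k < t + 1 ∧ pr cs k = pr cs i := by
      rw [hp]
      constructor
      · rintro ⟨i, k, h1, h2, h3⟩; exact ⟨i, k, h1, by omega, h3⟩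
      · rintro ⟨i, k, h1, h2, h3⟩
        refine ⟨i, k, h1, ?_, h3⟩
        rcases Nat.lt_succ_iff_lt_or_eq.mp h2 with h' | h'
        · exact h'
        · subst h'; exact absurd h3.symm (hfresh i (by omega))
    exact ⟨hA, hB, hs_step_iff cs t st.2.2 hs⟩
  · -- the pair was seen before, at first index i0
    have key : altStep cs (cs.length : Int) st (t : Int) =
        (st.1, (if (t : Int) - f ≥ 2 then true else st.2.1),
          if decide ((t : Int) + 2 < (cs.length : Int)) && (PySem.List.pyGet? cs (t : Int) == PySem.List.pyGet? cs ((t : Int) + 2)) then true else st.2.2) := by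
      unfold altStep
      rw [hps, hget]
    rw [key]
    obtain ⟨i0, hf, hi0t, hpri0, hmin0⟩ := (hd (pr cs t) f).1 hget
    have hA : ∀ q v, st.1.get? q = some v ↔
        ∃ i : Nat, v = (i : Int) ∧ i < t + 1 ∧ pr cs i = q ∧ ∀ i' < i, pr cs i' ≠ q := by
      intro q v
      rw [hd q v]
      constructor
      · rintro ⟨i, hv, hit, hpri, hmin⟩; exact ⟨i, hv, by omega, hpri, hmin⟩
      · rintro ⟨i, hv, hit, hpri, hmin⟩
        refine ⟨i, hv, ?_, hpri, hmin⟩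
        rcases Nat.lt_succ_iff_lt_or_eq.mp hit with h' | h'
        · exact h'
        · subst h'
          exact absurd (hpri0.trans hpri) (hmin i0 hi0t)
    have hB : (if (t : Int) - f ≥ 2 then true else st.2.1) = true ↔
        ∃ i k : Nat, i + 2 ≤ k ∧ k < t + 1 ∧ pr cs k = pr cs i := by
      subst hf
      by_cases hge : (t : Int) - (i0 : Int) ≥ 2
      · rw [if_pos hge]
        constructor
        · intro _; exact ⟨i0, t, by omega, by omega, hpri0.symm⟩
        · intro _; trivial
      · rw [if_neg hge, hp]
        constructor
        · rintro ⟨i, k, h1, h2, h3⟩; exact ⟨i, k, h1, by omega, h3⟩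
        · rintro ⟨i, k, h1, h2, h3⟩
          refine ⟨i, k, h1, ?_, h3⟩
          rcases Nat.lt_succ_iff_lt_or_eq.mp h2 with h' | h'
          · exact h'
          · subst h'
            have : ¬ i < i0 := fun hlt => hmin0 i hlt h3.symm
            omega
    exact ⟨hA, hB, hs_step_iff cs t st.2.2 hs⟩

lemma invB_fold (cs : List Char) (t : Nat) :
    InvB cs t ((List.range t).foldl (fun st k => altStep cs (cs.length : Int) st ((0 : Int) + (k : Nat))) (PySem.Dict.empty, false, false)) := by
  induction t with
  | zero =>
    refine ⟨?_, ?_, ?_⟩ <;> simp [PySem.Dict.get?_empty]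
  | succ t ih =>
    rw [List.range_succ, List.foldl_append, List.foldl_cons, List.foldl_nil]
    have := invB_step cs t _ ih
    simpa using this

lemma condB_iff (cs : List Char) :
    (((PySem.List.pyRange 0 ((cs.length : Int) - 1) 1).foldl (altStep cs (cs.length : Int)) (PySem.Dict.empty, false, false)).2.1 = true
      ↔ HPspec cs)
    ∧ (((PySem.List.pyRange 0 ((cs.length : Int) - 1) 1).foldl (altStep cs (cs.length : Int)) (PySem.Dict.empty, false, false)).2.2 = true
      ↔ HSspec cs) := by
  rw [PySem.List.pyRange_one, List.foldl_map]
  obtain ⟨_, hp, hs⟩ := invB_fold cs (((cs.length : Int) - 1 - 0).toNat)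
  have ht : ((cs.length : Int) - 1 - 0).toNat = cs.length - 1 := by omega
  constructor
  · rw [hp]
    constructor
    · rintro ⟨i, k, h1, h2, h3⟩; exact ⟨i, k, h1, by omega, h3⟩
    · rintro ⟨i, k, h1, h2, h3⟩; exact ⟨i, k, h1, by omega, h3⟩
  · rw [hs]
    constructor
    · rintro ⟨i, h1, _, h3⟩; exact ⟨i, h1, h3⟩
    · rintro ⟨i, h1, h3⟩; exact ⟨i, h1, by omega, h3⟩

lemma and_transfer (x y u v : Bool) (hx : x = true ↔ u = true) (hy : y = true ↔ v = true) :
    (if y == true && x == true then true else false) = (u && v) := by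
  cases x <;> cases y <;> cases u <;> cases v <;> simp_all

-- ===== VERDICT (by name: the statement is the Claim_ definition above) =====
theorem findNiceWord_spec : Claim_equal_findNiceWord := by
  intro word _
  unfold Spec_findNiceWord
  obtain ⟨hB1, hB2⟩ := condB_iff word.toList
  have h1 := condA1_iff word.toList
  have h2 := condA2_iff word.toList
  simp only [findNiceWord, findNiceWord_alt]
  exact and_transfer _ _ _ _ (h1.trans hB1.symm) (h2.trans hB2.symm)
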